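-- pv_equiv track=rewrite | github.com/Kinrokin/kings-theorem | scripts/pre_commit_hash_check.py | iter_blocks
-- ===== SOURCE A (Python) =====
-- def iter_blocks(lines: list[str]):
--     i = 0
--     n = len(lines)
--     while i < n:
--         line = lines[i].rstrip()
--         i += 1
--         if not line.strip() or line.lstrip().startswith("#"):
--             continue
--         if "==" not in line:
--             continue
--         header = line
--         block = []
--         while i < n:
--             nxt = lines[i]
--             if nxt.startswith(" ") or nxt.startswith("\t") or nxt.strip().startswith("--hash="):
--                 block.append(nxt.rstrip())
--                 i += 1
--             else:
--                 break
--         yield header, block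
-- ===== SOURCE B (Python) =====
-- def _is_header(raw):
--     line = raw.rstrip()
--     if not line.strip() or line.lstrip().startswith("#"):
--         return False
--     return "==" in line
--
--
-- def _is_cont(raw):
--     return raw.startswith(" ") or raw.startswith("\t") or raw.strip().startswith("--hash=")
--
--
-- def iter_blocks(lines: list[str]):
--     n = len(lines)
--     hdr = [_is_header(l) for l in lines]
--     cont = [_is_cont(l) for l in lines]
--     # a line belongs to a block iff it is a continuation line and the previous
--     # line was a header or itself belonged to a block (closed boolean recurrence)
--     consumed = [False] * n
--     for i in range(1, n):
--         consumed[i] = cont[i] and (hdr[i - 1] or consumed[i - 1])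
--     out = []
--     for line, h, k in zip(lines, hdr, consumed):
--         if k:
--             out[-1][1].append(line.rstrip())
--         elif h:
--             out.append((line.rstrip(), []))
--     yield from out
-- ===== Notes on version B (the rewrite author's own statement) =====
-- stated objective: alternative
-- what changed: Replaced A's cursor-driven outer while with a nested block-consuming inner loop by staged passes: precompute per-line header/continuation boolean tables, derive block membership by a closed one-step boolean recurrence (consumed[i] = cont[i] and (hdr[i-1] or consumed[i-1])), then a separate grouping pass appends each line to a new group or to the last group's block.
import Mathlib
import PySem

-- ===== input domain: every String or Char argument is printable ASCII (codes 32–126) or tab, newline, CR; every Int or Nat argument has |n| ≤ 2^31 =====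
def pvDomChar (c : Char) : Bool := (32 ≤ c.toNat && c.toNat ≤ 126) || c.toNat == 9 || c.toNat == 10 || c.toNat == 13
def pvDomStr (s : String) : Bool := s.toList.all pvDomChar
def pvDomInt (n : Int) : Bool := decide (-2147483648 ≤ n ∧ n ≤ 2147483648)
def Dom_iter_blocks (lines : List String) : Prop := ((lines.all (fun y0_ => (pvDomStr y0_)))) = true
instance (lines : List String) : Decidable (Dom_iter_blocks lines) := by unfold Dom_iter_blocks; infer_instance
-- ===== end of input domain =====

-- B replaces A's cursor-driven nested loops by staged passes: per-line header/continuation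
-- boolean tables, a one-step boolean recurrence for block membership, then one grouping pass
-- (objective: alternative). Both Pythons are generators that do not mutate their argument;
-- the claim is about the yielded sequence.

-- ===== PORT A =====
-- the continuation test A spells out:
-- nxt.startswith(" ") or nxt.startswith("\t") or nxt.strip().startswith("--hash=")
def contLine (nxt : String) : Bool :=
  PySem.Str.startswith nxt " " || PySem.Str.startswith nxt "\t" ||
    PySem.Str.startswith (PySem.Str.strip nxt) "--hash="

-- A's inner while loop: collect rstripped continuation lines, return them with the
-- unconsumed remainder (A breaks WITHOUT advancing i)
def takeBlock : List String → List String × List String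
  | [] => ([], [])
  | nxt :: rest =>
    if contLine nxt then
      let p := takeBlock rest
      (PySem.Str.rstrip nxt :: p.1, p.2)
    else ([], nxt :: rest)

-- needed by the port's termination proof (the outer loop resumes at takeBlock's remainder)
theorem takeBlock_len (ls : List String) : (takeBlock ls).2.length ≤ ls.length := by
  induction ls with
  | nil => simp [takeBlock]
  | cons nxt rest ih =>
    simp only [takeBlock]
    split
    · exact Nat.le_succ_of_le ih
    · simp

def iter_blocks (lines : List String) : List (String × List String) :=
  match lines with
  | [] => []
  | l :: rest =>
    let line := PySem.Str.rstrip l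
    if PySem.Str.strip line == "" || PySem.Str.startswith (PySem.Str.lstrip line) "#" then
      iter_blocks rest
    else if !(PySem.Str.isIn "==" line) then
      iter_blocks rest
    else
      let p := takeBlock rest
      (line, p.1) :: iter_blocks p.2
termination_by lines.length
decreasing_by
  · simp
  · simp
  · exact Nat.lt_succ_of_le (takeBlock_len rest)

-- ===== PORT B =====
-- Source B's _is_header
def isHeader (raw : String) : Bool :=
  let line := PySem.Str.rstrip raw
  if PySem.Str.strip line == "" || PySem.Str.startswith (PySem.Str.lstrip line) "#" then
    false
  else
    PySem.Str.isIn "==" line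

-- Source B's consumed loop: consumed[0] = False, consumed[i] = cont[i] and (hdr[i-1] or consumed[i-1]);
-- ported as a scan over the (hdr, cont) pairs whose carried state is hdr[i-1] or consumed[i-1]
def mkConsumed (active : Bool) : List (Bool × Bool) → List Bool
  | [] => []
  | (h, c) :: rest =>
    let k := c && active
    k :: mkConsumed (k || h) rest

-- Python's out[-1][1].append(x) ported as rebuilding out with the last block extended
-- (exact for nonempty out; Source B only reaches it with out nonempty)
def appendLast (out : List (String × List String)) (x : String) : List (String × List String) :=
  match out with
  | [] => []
  | [(h, b)] => [(h, b ++ [x])]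
  | p :: rest => p :: appendLast rest x

-- body of Source B's grouping for-loop, one (line, hdr, consumed) triple at a time
def groupStep (out : List (String × List String)) (t : String × Bool × Bool) :
    List (String × List String) :=
  if t.2.2 then appendLast out (PySem.Str.rstrip t.1)
  else if t.2.1 then out ++ [(PySem.Str.rstrip t.1, [])]
  else out

def iter_blocks_alt (lines : List String) : List (String × List String) :=
  let hdr := lines.map isHeader
  let cont := lines.map contLine
  let consumed := mkConsumed false (hdr.zip cont)
  (lines.zip (hdr.zip consumed)).foldl groupStep []

-- ===== PRECONDITION & SPEC =====
def Spec_iter_blocks (lines : List String) (out : List (String × List String)) : Prop := out = iter_blocks_alt lines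
instance (lines : List String) (out : List (String × List String)) : Decidable (Spec_iter_blocks lines out) := by unfold Spec_iter_blocks; infer_instance

-- ===== CLAIM (what is proved, stated in full; the proofs are below) =====
def Claim_equal_iter_blocks : Prop := ∀ (lines : List String), Dom_iter_blocks lines → Spec_iter_blocks lines (iter_blocks lines)

-- ===== LEMMAS AND PROOFS =====

-- B's staged pipeline fused into one recursion (proof-only helper)
def fused (active : Bool) (out : List (String × List String)) : List String → List (String × List String)
  | [] => out
  | l :: rest =>
    let h := isHeader l
    let k := contLine l && active
    fused (k || h)
      (if k then appendLast out (PySem.Str.rstrip l)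
       else if h then out ++ [(PySem.Str.rstrip l, [])] else out) rest

theorem fused_cons (active : Bool) (out : List (String × List String)) (l : String) (rest : List String) :
    fused active out (l :: rest)
      = fused (contLine l && active || isHeader l)
          (if contLine l && active then appendLast out (PySem.Str.rstrip l)
           else if isHeader l then out ++ [(PySem.Str.rstrip l, [])] else out) rest := rfl

theorem pipeline_eq_fused (ls : List String) (active : Bool) (out : List (String × List String)) :
    (ls.zip ((ls.map isHeader).zip (mkConsumed active ((ls.map isHeader).zip (ls.map contLine))))).foldl groupStep out
      = fused active out ls := by
  induction ls generalizing active out with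
  | nil => rfl
  | cons l rest ih =>
    rw [List.map_cons, List.map_cons, List.zip_cons_cons, mkConsumed, List.zip_cons_cons,
      List.zip_cons_cons, List.foldl_cons]
    rw [ih]
    rw [fused_cons]
    rw [groupStep]

theorem appendLast_cons (p : String × List String) (ys : List (String × List String)) (x : String)
    (hne : ys ≠ []) : appendLast (p :: ys) x = p :: appendLast ys x := by
  cases ys with
  | nil => exact absurd rfl hne
  | cons q r => rfl

theorem appendLast_concat (xs : List (String × List String)) (h : String) (b : List String) (x : String) :
    appendLast (xs ++ [(h, b)]) x = xs ++ [(h, b ++ [x])] := by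
  induction xs with
  | nil => rfl
  | cons p rest ih =>
    rw [List.cons_append, appendLast_cons p (rest ++ [(h, b)]) x (by simp), ih]
    rfl

-- in-block state: B consumes exactly A's takeBlock into the last group, then is fresh again
theorem fused_active (ls : List String) (init : List (String × List String)) (h0 : String) (b0 : List String) :
    fused true (init ++ [(h0, b0)]) ls
      = fused false (init ++ [(h0, b0 ++ (takeBlock ls).1)]) (takeBlock ls).2 := by
  induction ls generalizing b0 with
  | nil => simp [fused, takeBlock]
  | cons l rest ih =>
    by_cases hc : contLine l = true
    · rw [fused_cons, takeBlock]
      simp only [hc, Bool.true_and, if_true, Bool.true_or, appendLast_concat]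
      rw [ih (b0 ++ [PySem.Str.rstrip l])]
      simp
    · simp only [Bool.not_eq_true] at hc
      simp only [takeBlock, hc, Bool.false_eq_true, if_false, List.append_nil]
      rw [fused_cons, fused_cons]
      simp [hc]

-- fresh state: B's fused pass appends exactly A's groups
theorem fused_false (ls : List String) (out : List (String × List String)) :
    fused false out ls = out ++ iter_blocks ls := by
  induction ls using iter_blocks.induct generalizing out with
  | case1 => simp [fused, iter_blocks]
  | case2 l rest line hskip ih =>
    have hh : isHeader l = false := by
      simp only [isHeader]
      rw [if_pos hskip]
    rw [iter_blocks.eq_def]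
    simp only []
    rw [if_pos hskip]
    rw [fused_cons]
    simp only [hh, Bool.and_false, Bool.or_false, if_neg (by simp : ¬ (false = true))]
    exact ih out
  | case3 l rest line hskip hne ih =>
    have hh : isHeader l = false := by
      simp only [isHeader]
      rw [if_neg hskip]
      simp only [Bool.not_eq_true'] at hne
      exact hne
    rw [iter_blocks.eq_def]
    simp only []
    rw [if_neg hskip, if_pos hne]
    rw [fused_cons]
    simp only [hh, Bool.and_false, Bool.or_false, if_neg (by simp : ¬ (false = true))]
    exact ih out
  | case4 l rest line hskip hne p ih =>
    have hh : isHeader l = true := by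
      simp only [isHeader]
      rw [if_neg hskip]
      simp only [Bool.not_eq_true, Bool.not_eq_false'] at hne
      exact hne
    rw [iter_blocks.eq_def]
    simp only []
    rw [if_neg hskip, if_neg hne]
    rw [fused_cons]
    simp only [hh, Bool.and_false, Bool.false_or,
      if_neg (by simp : ¬ (false = true)), if_true]
    rw [fused_active rest out (PySem.Str.rstrip l) []]
    simp only [List.nil_append]
    rw [ih]
    simp
    rfl

-- ===== VERDICT (by name: the statement is the Claim_ definition above) =====
theorem iter_blocks_spec : Claim_equal_iter_blocks := by
  intro lines _
  unfold Spec_iter_blocks iter_blocks_alt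
  rw [pipeline_eq_fused, fused_false]
  simp
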